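-- pv_equiv track=rewrite | github.com/SukiCZ/Advent-of-Code-2024 | day/09/python_09.py | defragment
-- ===== SOURCE A (Python) =====
-- def defragment(blocks: list[int | None]) -> list[int | None]:
--     """
--     Move the rightmost non-empty block to the leftmost empty position.
--     """
--     left = 0
--     right = len(blocks) - 1
--
--     while left < right:
--         while left < right and blocks[left] is not None:
--             left += 1
--         while left < right and blocks[right] is None:
--             right -= 1
--         if left < right:
--             blocks[left], blocks[right] = blocks[right], None
--             left += 1
--             right -= 1
--
--     return blocks
-- ===== SOURCE B (Python) =====
-- def defragment(blocks: list[int | None]) -> list[int | None]: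
--     """
--     Move the rightmost non-empty block to the leftmost empty position.
--     """
--     k = sum(1 for b in blocks if b is not None)
--     fillers = [b for b in blocks[k:] if b is not None]
--     result = []
--     for i, b in enumerate(blocks):
--         if i >= k:
--             result.append(None)
--         elif b is not None:
--             result.append(b)
--         else:
--             result.append(fillers.pop())
--     blocks[:] = result
--     return blocks
-- ===== Notes on version B (the rewrite author's own statement) =====
-- stated objective: alternative
-- what changed: Replaces A's in-place converging two-pointer swap loop by a count-then-build pass: count k of non-empty blocks, collect the blocks beyond position k as a filler stack popped rightmost-first, and rebuild the list left to right (then write it back in place).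
import Mathlib
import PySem

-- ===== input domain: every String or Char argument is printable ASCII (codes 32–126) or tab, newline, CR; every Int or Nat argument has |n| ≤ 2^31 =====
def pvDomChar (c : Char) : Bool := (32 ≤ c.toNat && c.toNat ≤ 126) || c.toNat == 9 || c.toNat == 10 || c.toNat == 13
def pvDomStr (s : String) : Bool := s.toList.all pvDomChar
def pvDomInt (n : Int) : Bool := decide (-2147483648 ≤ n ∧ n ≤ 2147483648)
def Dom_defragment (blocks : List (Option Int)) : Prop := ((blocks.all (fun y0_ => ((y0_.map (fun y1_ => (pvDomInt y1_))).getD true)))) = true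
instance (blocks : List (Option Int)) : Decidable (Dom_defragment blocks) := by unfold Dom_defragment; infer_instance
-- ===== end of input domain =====

-- B replaces A's converging two-pointer swap loop by a count-then-build pass (count k of
-- non-empty blocks, collect the tail blocks beyond k as a filler stack, rebuild left to right);
-- both A and B mutate `blocks` in place to the same final content, and the theorem is about the
-- returned value.

-- ===== PORT A =====
-- inner while loop: `while left < right and blocks[left] is not None: left += 1`
-- (blocks[left] is always in range while the loop runs, so pyGetD is exact here)
def pvSkipL (xs : List (Option Int)) (l r : Int) : Int :=
  if h : l < r ∧ PySem.List.pyGetD xs l none ≠ none then pvSkipL xs (l + 1) r else l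
termination_by (r - l).toNat
decreasing_by omega

-- inner while loop: `while left < right and blocks[right] is None: right -= 1`
def pvSkipR (xs : List (Option Int)) (l r : Int) : Int :=
  if h : l < r ∧ PySem.List.pyGetD xs r none = none then pvSkipR xs l (r - 1) else r
termination_by (r - l).toNat
decreasing_by omega

-- bounds of the inner loops, needed for the outer loop's termination
theorem pvSkipL_ge (xs : List (Option Int)) (l r : Int) : l ≤ pvSkipL xs l r := by
  fun_induction pvSkipL xs l r with
  | case1 l h ih => omega
  | case2 l h => omega

theorem pvSkipR_le (xs : List (Option Int)) (l r : Int) : pvSkipR xs l r ≤ r := by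
  fun_induction pvSkipR xs l r with
  | case1 l h ih => omega
  | case2 l h => omega

-- outer while loop of A; the swap `blocks[left], blocks[right] = blocks[right], None`
def pvLoop (xs : List (Option Int)) (l r : Int) : List (Option Int) :=
  if h : l < r then
    let l' := pvSkipL xs l r
    let r' := pvSkipR xs l' r
    if h2 : l' < r' then
      pvLoop (PySem.List.pySetD (PySem.List.pySetD xs l' (PySem.List.pyGetD xs r' none)) r' none)
        (l' + 1) (r' - 1)
    else xs
  else xs
termination_by (r - l).toNat
decreasing_by
  have h1 := pvSkipL_ge xs l r
  have h3 := pvSkipR_le xs (pvSkipL xs l r) r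
  omega

def defragment (blocks : List (Option Int)) : List (Option Int) :=
  pvLoop blocks 0 ((blocks.length : Int) - 1)

-- ===== PORT B =====
-- k = sum(1 for b in blocks if b is not None)
def pvCount (blocks : List (Option Int)) : Int :=
  blocks.foldl (fun a b => if b ≠ none then a + 1 else a) 0

-- fillers = [b for b in blocks[k:] if b is not None]
def pvFillers (blocks : List (Option Int)) (k : Int) : List Int :=
  (PySem.List.slice blocks (some k) none).filterMap id

-- the `for i, b in enumerate(blocks)` loop building `result`;
-- fillers.pop() = last element + rest (IndexError on empty fillers is unreachable: the number of
-- empty slots before k always equals the number of fillers; the port emits none there)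
def pvFill (k : Int) (rest : List (Option Int)) (i : Int) (fillers : List Int) :
    List (Option Int) :=
  match rest with
  | [] => []
  | b :: t =>
    if k ≤ i then none :: pvFill k t (i + 1) fillers
    else
      match b with
      | some v => some v :: pvFill k t (i + 1) fillers
      | none =>
        match PySem.List.pop? fillers (-1) with
        | some (x, f') => some x :: pvFill k t (i + 1) f'
        | none => none :: pvFill k t (i + 1) fillers

def defragment_alt (blocks : List (Option Int)) : List (Option Int) :=
  let k := pvCount blocks
  let fillers := pvFillers blocks k
  pvFill k blocks 0 fillers

-- ===== PRECONDITION & SPEC =====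
def Spec_defragment (blocks : List (Option Int)) (out : List (Option Int)) : Prop := out = defragment_alt blocks
instance (blocks : List (Option Int)) (out : List (Option Int)) : Decidable (Spec_defragment blocks out) := by unfold Spec_defragment; infer_instance

-- ===== CLAIM (what is proved, stated in full; the proofs are below) =====
def Claim_equal_defragment : Prop := ∀ (blocks : List (Option Int)), Dom_defragment blocks → Spec_defragment blocks (defragment blocks)

-- ===== LEMMAS AND PROOFS =====

theorem pvSkipL_le (xs : List (Option Int)) (l r : Int) (h : l ≤ r) : pvSkipL xs l r ≤ r := by
  fun_induction pvSkipL xs l r with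
  | case1 l h ih => exact ih (by omega)
  | case2 l h => omega

-- the fillers state left over after pvFill has processed `rest` (proof-only helper)
def pvFillSt (k : Int) (rest : List (Option Int)) (i : Int) (fillers : List Int) : List Int :=
  match rest with
  | [] => fillers
  | b :: t =>
    if k ≤ i then pvFillSt k t (i + 1) fillers
    else
      match b with
      | some _ => pvFillSt k t (i + 1) fillers
      | none =>
        match PySem.List.pop? fillers (-1) with
        | some (_, f') => pvFillSt k t (i + 1) f'
        | none => pvFillSt k t (i + 1) fillers


theorem pvFill_append (k : Int) (as bs : List (Option Int)) (i : Int) (f : List Int) :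
    pvFill k (as ++ bs) i f =
      pvFill k as i f ++ pvFill k bs (i + as.length) (pvFillSt k as i f) := by
  induction as generalizing i f with
  | nil => simp [pvFill, pvFillSt]
  | cons b t ih =>
    have harith : ∀ j : Int, (j + 1) + (t.length : Int) = j + ((t.length : Int) + 1) := by omega
    by_cases hk : k ≤ i
    · simp only [List.cons_append, pvFill, pvFillSt, if_pos hk, ih, List.length_cons]
      push_cast
      rw [harith]
    · cases b with
      | some v =>
        simp only [List.cons_append, pvFill, pvFillSt, if_neg hk, ih, List.length_cons]
        push_cast
        rw [harith]
      | none =>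
        cases hp : PySem.List.pop? f (-1) with
        | some p =>
          simp only [List.cons_append, pvFill, pvFillSt, if_neg hk, hp, ih, List.length_cons]
          push_cast
          rw [harith]
        | none =>
          simp only [List.cons_append, pvFill, pvFillSt, if_neg hk, hp, ih, List.length_cons]
          push_cast
          rw [harith]

theorem pvFill_shift (k : Int) (rest : List (Option Int)) (i : Int) (f : List Int) :
    pvFill (k + 1) rest (i + 1) f = pvFill k rest i f := by
  induction rest generalizing i f with
  | nil => simp [pvFill]
  | cons b t ih =>
    by_cases hk : k ≤ i
    · simp only [pvFill, if_pos hk, if_pos (show k + 1 ≤ i + 1 by omega), ih]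
    · cases b with
      | some v => simp only [pvFill, if_neg hk, if_neg (show ¬ k + 1 ≤ i + 1 by omega), ih]
      | none =>
        cases hp : PySem.List.pop? f (-1) with
        | some p => simp only [pvFill, if_neg hk, if_neg (show ¬ k + 1 ≤ i + 1 by omega), hp, ih]
        | none => simp only [pvFill, if_neg hk, if_neg (show ¬ k + 1 ≤ i + 1 by omega), hp, ih]

theorem pvFill_single_high (k i : Int) (b : Option Int) (f : List Int) (h : k ≤ i) :
    pvFill k [b] i f = [none] := by
  simp [pvFill, if_pos h]

theorem pvCount_aux (xs : List (Option Int)) (a : Int) :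
    xs.foldl (fun a b => if b ≠ none then a + 1 else a) a = a + (xs.countP (·.isSome) : Int) := by
  induction xs generalizing a with
  | nil => simp
  | cons b t ih =>
    rw [List.foldl_cons]
    cases b with
    | some v =>
      rw [if_pos (by simp : (some v : Option Int) ≠ none), ih, List.countP_cons]
      simp only [Option.isSome_some, if_pos]
      push_cast
      ring
    | none =>
      rw [if_neg (by simp : ¬ ((none : Option Int) ≠ none)), ih, List.countP_cons]
      simp

theorem pvCount_eq (xs : List (Option Int)) : pvCount xs = (xs.countP (·.isSome) : Int) := by
  unfold pvCount
  rw [pvCount_aux]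
  simp

theorem pvFillers_eq (xs : List (Option Int)) (n : Nat) :
    pvFillers xs (n : Int) = (xs.drop n).filterMap id := by
  unfold pvFillers
  rw [PySem.List.slice_from_natCast]

theorem alt_normal (xs : List (Option Int)) :
    defragment_alt xs =
      pvFill (xs.countP (·.isSome) : Int) xs 0
        ((xs.drop (xs.countP (·.isSome))).filterMap id) := by
  show pvFill (pvCount xs) xs 0 (pvFillers xs (pvCount xs)) = _
  rw [pvCount_eq, pvFillers_eq]

theorem alt_nil : defragment_alt [] = [] := by rfl

theorem alt_single (b : Option Int) : defragment_alt [b] = [b] := by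
  cases b <;> rfl

theorem alt_cons_some (v : Int) (ys : List (Option Int)) :
    defragment_alt (some v :: ys) = some v :: defragment_alt ys := by
  rw [alt_normal, alt_normal]
  have h1 : (some v :: ys).countP (·.isSome) = ys.countP (·.isSome) + 1 := by
    simp
  rw [h1, List.drop_succ_cons]
  rw [show ((ys.countP (·.isSome) + 1 : Nat) : Int) = (ys.countP (·.isSome) : Int) + 1 by
    push_cast; ring]
  simp only [pvFill]
  rw [if_neg (show ¬ ((ys.countP (·.isSome) : Int) + 1 ≤ 0) by omega)]
  rw [pvFill_shift]

theorem alt_snoc_none (ys : List (Option Int)) :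
    defragment_alt (ys ++ [none]) = defragment_alt ys ++ [none] := by
  rw [alt_normal, alt_normal]
  have h1 : List.countP (fun b : Option Int => b.isSome) (ys ++ [none]) =
      ys.countP (·.isSome) := by
    simp [List.countP_append]
  have hle : ys.countP (·.isSome) ≤ ys.length := List.countP_le_length
  rw [h1, List.drop_append_of_le_length hle, List.filterMap_append]
  simp only [List.filterMap_cons, List.filterMap_nil, id_eq, List.append_nil]
  rw [pvFill_append, pvFill_single_high _ _ _ _ (by omega)]


theorem alt_wrap (v : Int) (ys : List (Option Int)) :
    defragment_alt (none :: ys ++ [some v]) = some v :: defragment_alt ys ++ [none] := by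
  rw [alt_normal, alt_normal]
  simp only [List.cons_append]
  have h1 : (none :: (ys ++ [some v])).countP (·.isSome) = ys.countP (·.isSome) + 1 := by
    simp [List.countP_append]
  have hle : ys.countP (·.isSome) ≤ ys.length := List.countP_le_length
  rw [h1, List.drop_succ_cons, List.drop_append_of_le_length hle, List.filterMap_append]
  simp only [List.filterMap_cons, List.filterMap_nil, id_eq]
  -- evaluate the first step of pvFill: index 0 < k, block none, pop the last filler v
  simp only [pvFill]
  rw [if_neg (show ¬ (((ys.countP (·.isSome) + 1 : Nat) : Int) ≤ 0) by omega)]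
  rw [PySem.List.pop?_last]
  simp only []
  rw [show ((ys.countP (·.isSome) + 1 : Nat) : Int) = (ys.countP (·.isSome) : Int) + 1 by
    push_cast; ring]
  rw [pvFill_shift, pvFill_append, pvFill_single_high _ _ _ _ (by omega)]


-- ==== characterisation of the skip loops ====

theorem pvSkipL_stop (xs : List (Option Int)) (r m : Int)
    (hstop : m = r ∨ PySem.List.pyGetD xs m none = none) : pvSkipL xs m r = m := by
  rw [pvSkipL, dif_neg]
  rintro ⟨hlt, hne⟩
  rcases hstop with h | h
  · omega
  · exact hne h

theorem pvSkipL_eq_of (xs : List (Option Int)) (l r m : Int) (h1 : l ≤ m) (h2 : m ≤ r)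
    (hall : ∀ j, l ≤ j → j < m → PySem.List.pyGetD xs j none ≠ none)
    (hstop : m = r ∨ PySem.List.pyGetD xs m none = none) :
    pvSkipL xs l r = m := by
  have key : ∀ (n : Nat) (l : Int), (m - l).toNat ≤ n → l ≤ m →
      (∀ j, l ≤ j → j < m → PySem.List.pyGetD xs j none ≠ none) → pvSkipL xs l r = m := by
    intro n
    induction n with
    | zero =>
      intro l hn hl _
      have : l = m := by omega
      subst this
      exact pvSkipL_stop xs r l hstop
    | succ n ih =>
      intro l hn hl hall'
      by_cases hlm : l = m
      · subst hlm
        exact pvSkipL_stop xs r l hstop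
      · rw [pvSkipL, dif_pos ⟨by omega, hall' l le_rfl (by omega)⟩]
        exact ih (l + 1) (by omega) (by omega) (fun j hj1 hj2 => hall' j (by omega) hj2)
  exact key (m - l).toNat l le_rfl h1 hall

theorem pvSkipR_stop (xs : List (Option Int)) (l m : Int)
    (hstop : m = l ∨ PySem.List.pyGetD xs m none ≠ none) : pvSkipR xs l m = m := by
  rw [pvSkipR, dif_neg]
  rintro ⟨hlt, hz⟩
  rcases hstop with h | h
  · omega
  · exact h hz

theorem pvSkipL_char (xs : List (Option Int)) (l r : Int) :
    (∀ j, l ≤ j → j < pvSkipL xs l r → PySem.List.pyGetD xs j none ≠ none) ∧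
      (pvSkipL xs l r < r → PySem.List.pyGetD xs (pvSkipL xs l r) none = none) := by
  fun_induction pvSkipL xs l r with
  | case1 l h ih =>
    refine ⟨fun j hj1 hj2 => ?_, ih.2⟩
    by_cases hje : j = l
    · subst hje; exact h.2
    · exact ih.1 j (by omega) hj2
  | case2 l h =>
    refine ⟨fun j hj1 hj2 => by omega, fun hlt => ?_⟩
    by_contra hne
    exact h ⟨hlt, hne⟩

theorem pvLoop_base (xs : List (Option Int)) (l r : Int) (h : ¬ l < r) : pvLoop xs l r = xs := by
  rw [pvLoop, dif_neg h]

theorem pvLoop_some (xs : List (Option Int)) (l r : Int) (v : Int) (h2 : l < r)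
    (hv : PySem.List.pyGetD xs l none = some v) : pvLoop xs l r = pvLoop xs (l + 1) r := by
  have hskip : pvSkipL xs l r = pvSkipL xs (l + 1) r := by
    rw [pvSkipL, dif_pos ⟨h2, by simp [hv]⟩]
  by_cases h3 : l + 1 < r
  · rw [pvLoop, dif_pos h2]
    conv_rhs => rw [pvLoop, dif_pos h3]
    rw [hskip]
  · have hr : r = l + 1 := by omega
    subst hr
    have e1 : pvSkipL xs (l + 1) (l + 1) = l + 1 := pvSkipL_stop xs (l + 1) (l + 1) (Or.inl rfl)
    have e2 : pvSkipR xs (l + 1) (l + 1) = l + 1 := pvSkipR_stop xs (l + 1) (l + 1) (Or.inl rfl)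
    rw [pvLoop, dif_pos h2, pvLoop_base xs (l + 1) (l + 1) (by omega)]
    simp only [hskip, e1, e2]
    rw [dif_neg (by omega)]

theorem pvLoop_rnone (xs : List (Option Int)) (l r : Int) (h2 : l < r)
    (hr : PySem.List.pyGetD xs r none = none) : pvLoop xs l r = pvLoop xs l (r - 1) := by
  have hLge := pvSkipL_ge xs l r
  have hLle := pvSkipL_le xs l r (by omega)
  by_cases hA : pvSkipL xs l r = r
  · -- the left scan ran all the way to r: everything in [l, r) is non-empty
    have hall := (pvSkipL_char xs l r).1
    have e2 : pvSkipR xs r r = r := pvSkipR_stop xs r r (Or.inl rfl)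
    rw [pvLoop, dif_pos h2]
    simp only [hA, e2]
    rw [dif_neg (by omega)]
    by_cases h3 : l < r - 1
    · have eL : pvSkipL xs l (r - 1) = r - 1 :=
        pvSkipL_eq_of xs l (r - 1) (r - 1) (by omega) le_rfl
          (fun j hj1 hj2 => hall j hj1 (by omega)) (Or.inl rfl)
      have eR : pvSkipR xs (r - 1) (r - 1) = r - 1 := pvSkipR_stop xs (r - 1) (r - 1) (Or.inl rfl)
      rw [pvLoop, dif_pos h3]
      simp only [eL, eR]
      rw [dif_neg (by omega)]
    · rw [pvLoop_base xs l (r - 1) h3]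
  · -- the left scan stopped at an empty slot strictly before r
    have hL : pvSkipL xs l r < r := by omega
    have hLn := (pvSkipL_char xs l r).2 hL
    have hall := (pvSkipL_char xs l r).1
    have eL : pvSkipL xs l (r - 1) = pvSkipL xs l r :=
      pvSkipL_eq_of xs l (r - 1) (pvSkipL xs l r) hLge (by omega) hall (Or.inr hLn)
    have eR : pvSkipR xs (pvSkipL xs l r) r = pvSkipR xs (pvSkipL xs l r) (r - 1) := by
      rw [pvSkipR, dif_pos ⟨hL, hr⟩]
    by_cases h3 : l < r - 1
    · rw [pvLoop, dif_pos h2]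
      conv_rhs => rw [pvLoop, dif_pos h3]
      simp only [eL, eR]
    · -- r = l + 1, and blocks[l] is empty: both sides are xs
      have hLl : pvSkipL xs l r = l := by omega
      have eR2 : pvSkipR xs l r = l := by
        rw [pvSkipR, dif_pos ⟨h2, hr⟩, show r - 1 = l by omega]
        exact pvSkipR_stop xs l l (Or.inl rfl)
      rw [pvLoop, dif_pos h2, pvLoop_base xs l (r - 1) h3]
      simp only [hLl, eR2]
      rw [dif_neg (by omega)]

theorem pvLoop_swap (xs : List (Option Int)) (l r : Int) (v : Int) (h0 : 0 ≤ l) (h2 : l < r)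
    (hl : PySem.List.pyGetD xs l none = none) (hr : PySem.List.pyGetD xs r none = some v) :
    pvLoop xs l r =
      pvLoop ((xs.set l.toNat (some v)).set r.toNat none) (l + 1) (r - 1) := by
  have eL : pvSkipL xs l r = l := pvSkipL_stop xs r l (Or.inr hl)
  have eR : pvSkipR xs l r = r := pvSkipR_stop xs l r (Or.inr (by simp [hr]))
  rw [pvLoop, dif_pos h2]
  simp only [eL, eR]
  rw [dif_pos h2, hr]
  simp only [PySem.List.pySetD_of_nonneg _ _ (show (0:Int) ≤ l by omega),
    PySem.List.pySetD_of_nonneg _ _ (show (0:Int) ≤ r by omega)]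

-- ==== the main glue induction ====

-- decomposing a segment of the list at its two ends
theorem seg_cons (xs : List (Option Int)) (a n : Nat) (h : a < xs.length) :
    (xs.drop a).take (n + 1) = xs[a] :: (xs.drop (a + 1)).take n := by
  rw [List.drop_eq_getElem_cons h, List.take_succ_cons]

theorem seg_snoc (xs : List (Option Int)) (a n : Nat) (h : a + n < xs.length) :
    (xs.drop a).take (n + 1) = (xs.drop a).take n ++ [xs[a + n]] := by
  rw [List.take_add_one, List.getElem?_drop, List.getElem?_eq_getElem h]
  rfl

theorem take_set_snoc (xs : List (Option Int)) (a : Nat) (v : Option Int) (h : a < xs.length) :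
    (xs.set a v).take (a + 1) = xs.take a ++ [v] := by
  rw [List.take_set, List.take_add_one, List.getElem?_eq_getElem h]
  rw [List.set_append_right _ _ (by simp)]
  simp only [Option.toList_some, List.length_take]
  rw [show a - min a xs.length = 0 by omega, List.set_cons_zero]

theorem pvLoop_glue (N : Nat) (xs : List (Option Int)) (l r : Int)
    (hN : (r + 1 - l).toNat ≤ N) (h0 : 0 ≤ l) (hlr : l ≤ r + 1) (hr : r < (xs.length : Int)) :
    pvLoop xs l r =
      xs.take l.toNat ++ defragment_alt ((xs.drop l.toNat).take (r + 1 - l).toNat) ++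
        xs.drop (r + 1).toNat := by
  induction N generalizing xs l r with
  | zero =>
    have hl : l = r + 1 := by omega
    subst hl
    rw [pvLoop_base _ _ _ (by omega)]
    rw [show (r + 1 - (r + 1)).toNat = 0 by omega]
    simp [alt_nil]
  | succ n ih =>
    by_cases hc : l < r
    · -- the loop body runs
      have ha : l.toNat < xs.length := by omega
      have hb : r.toNat < xs.length := by omega
      have hgl : PySem.List.pyGetD xs l none = xs[l.toNat] :=
        PySem.List.pyGetD_eq_getElem xs none h0 (by omega)
      have hgr : PySem.List.pyGetD xs r none = xs[r.toNat] :=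
        PySem.List.pyGetD_eq_getElem xs none (by omega) hr
      cases hvl : xs[l.toNat] with
      | some v =>
        -- blocks[left] is occupied: advance left
        rw [pvLoop_some xs l r v hc (by rw [hgl, hvl])]
        rw [ih xs (l + 1) r (by omega) (by omega) (by omega) hr]
        rw [show (l + 1).toNat = l.toNat + 1 by omega]
        rw [show (r + 1 - l).toNat = (r + 1 - (l + 1)).toNat + 1 by omega]
        rw [seg_cons xs l.toNat _ ha, hvl, alt_cons_some]
        rw [List.take_add_one, List.getElem?_eq_getElem ha, hvl]
        simp
      | none =>
        cases hvr : xs[r.toNat] with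
        | none =>
          -- blocks[right] is empty: retreat right
          rw [pvLoop_rnone xs l r hc (by rw [hgr, hvr])]
          rw [ih xs l (r - 1) (by omega) h0 (by omega) (by omega)]
          rw [show (r - 1 + 1).toNat = r.toNat by omega]
          rw [show (r + 1 - l).toNat = (r - 1 + 1 - l).toNat + 1 by omega]
          rw [seg_snoc xs l.toNat _ (by omega)]
          simp only [show l.toNat + (r - 1 + 1 - l).toNat = r.toNat by omega, hvr]
          rw [alt_snoc_none]
          rw [List.drop_eq_getElem_cons hb, hvr]
          rw [show (r + 1).toNat = r.toNat + 1 by omega]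
          simp
        | some v =>
          -- swap: blocks[left] ← v, blocks[right] ← empty
          rw [pvLoop_swap xs l r v h0 hc (by rw [hgl, hvl]) (by rw [hgr, hvr])]
          have hlen : ((xs.set l.toNat (some v)).set r.toNat none).length = xs.length := by
            simp
          rw [ih ((xs.set l.toNat (some v)).set r.toNat none) (l + 1) (r - 1)
            (by omega) (by omega) (by omega) (by rw [hlen]; omega)]
          -- (i) its first l+1 entries are xs.take l ++ [some v]
          have hi : ((xs.set l.toNat (some v)).set r.toNat none).take ((l + 1).toNat) =
              xs.take l.toNat ++ [some v] := by
            rw [show (l + 1).toNat = l.toNat + 1 by omega]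
            rw [List.take_set, List.set_eq_of_length_le (by simp; omega), take_set_snoc _ _ _ ha]
          -- (ii) from r on it is none :: xs.drop (r+1)
          have hii : ((xs.set l.toNat (some v)).set r.toNat none).drop ((r - 1 + 1).toNat) =
              none :: xs.drop ((r + 1).toNat) := by
            rw [show (r - 1 + 1).toNat = r.toNat by omega]
            rw [List.drop_set, if_neg (by omega), List.drop_set, if_pos (by omega)]
            rw [List.drop_eq_getElem_cons hb, show r.toNat - r.toNat = 0 by omega,
              List.set_cons_zero, show (r + 1).toNat = r.toNat + 1 by omega]
          -- (iii) the strict middle is untouched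
          have hiii : (((xs.set l.toNat (some v)).set r.toNat none).drop ((l + 1).toNat)).take
                ((r - 1 + 1 - (l + 1)).toNat) =
              (xs.drop (l.toNat + 1)).take (r.toNat - (l.toNat + 1)) := by
            rw [show (l + 1).toNat = l.toNat + 1 by omega,
              show (r - 1 + 1 - (l + 1)).toNat = r.toNat - (l.toNat + 1) by omega]
            rw [List.drop_set, if_neg (by omega), List.drop_set, if_pos (by omega)]
            rw [List.take_set, List.set_eq_of_length_le (by simp)]
          rw [hi, hii, hiii]
          -- and the original segment splits as none :: middle ++ [some v]
          rw [show (r + 1 - l).toNat = (r.toNat - (l.toNat + 1) + 1) + 1 by omega]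
          rw [seg_cons xs l.toNat _ ha, hvl]
          rw [seg_snoc xs (l.toNat + 1) _ (by omega)]
          simp only [show l.toNat + 1 + (r.toNat - (l.toNat + 1)) = r.toNat by omega, hvr]
          rw [← List.cons_append, alt_wrap]
          simp
    · -- the loop stops: at most one cell remains
      rw [pvLoop_base _ _ _ hc]
      by_cases hone : l = r
      · subst hone
        have ha : l.toNat < xs.length := by omega
        rw [show (l + 1 - l).toNat = 1 by omega]
        rw [show (1 : Nat) = 0 + 1 from rfl, seg_cons xs l.toNat 0 ha]
        rw [List.take_zero, alt_single]
        conv_lhs => rw [← List.take_append_drop l.toNat xs]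
        rw [List.drop_eq_getElem_cons ha, show (l + 1).toNat = l.toNat + 1 by omega]
        simp
      · have hl : l = r + 1 := by omega
        subst hl
        rw [show (r + 1 - (r + 1)).toNat = 0 by omega]
        simp [alt_nil]

-- ===== VERDICT (by name: the statement is the Claim_ definition above) =====
theorem defragment_spec : Claim_equal_defragment := by
  intro blocks _
  unfold Spec_defragment defragment
  have h := pvLoop_glue (blocks.length + 1) blocks 0 ((blocks.length : Int) - 1)
    (by omega) (by omega) (by omega) (by omega)
  simpa using h
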